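-- pv_equiv track=rewrite | github.com/ldw3097/Algorithm_study | 24.11.26/이차원_배열과_연산.py | linecalc
-- ===== SOURCE A (Python) =====
-- def linecalc(idx, arr, isrcalc):
--     lim = len(arr[0]) if isrcalc else len(arr)
--     items = {}
--     for i in range(lim):
--         item = arr[idx][i] if isrcalc else arr[i][idx]
--         if item == 0:
--             continue
--         items.setdefault(item, 0)
--         items[item] += 1
--     items = items.items()
--     items = sorted(items, key = lambda x: (x[1], x[0]))
--     newlist = []
--     for item in items:
--         newlist.extend(item)
--     if len(newlist) > 100:
--         newlist = newlist[:100]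
--     return newlist
-- ===== SOURCE B (Python) =====
-- def linecalc(idx, arr, isrcalc):
--     line = arr[idx][:len(arr[0])] if isrcalc else [row[idx] for row in arr]
--     vals = sorted(v for v in line if v != 0)
--     runs = []
--     for v in vals:
--         if runs and runs[-1][1] == v:
--             runs[-1] = (runs[-1][0] + 1, v)
--         else:
--             runs.append((1, v))
--     runs.sort()
--     out = []
--     for c, v in runs:
--         out.append(v)
--         out.append(c)
--     return out[:100]
-- ===== Notes on version B (the rewrite author's own statement) =====
-- stated objective: alternative
-- what changed: Replaces A's dict-increment counting by a sort-then-group-runs strategy: sort the nonzero entries of the extracted line, run-length-encode consecutive equal values in one accumulator pass into (count,value) runs, sort the runs lexicographically and flatten, slicing to 100.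
-- outside the precondition, e.g. on linecalc(5, [[]], True): A returns [], B raises IndexError
import Mathlib
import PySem

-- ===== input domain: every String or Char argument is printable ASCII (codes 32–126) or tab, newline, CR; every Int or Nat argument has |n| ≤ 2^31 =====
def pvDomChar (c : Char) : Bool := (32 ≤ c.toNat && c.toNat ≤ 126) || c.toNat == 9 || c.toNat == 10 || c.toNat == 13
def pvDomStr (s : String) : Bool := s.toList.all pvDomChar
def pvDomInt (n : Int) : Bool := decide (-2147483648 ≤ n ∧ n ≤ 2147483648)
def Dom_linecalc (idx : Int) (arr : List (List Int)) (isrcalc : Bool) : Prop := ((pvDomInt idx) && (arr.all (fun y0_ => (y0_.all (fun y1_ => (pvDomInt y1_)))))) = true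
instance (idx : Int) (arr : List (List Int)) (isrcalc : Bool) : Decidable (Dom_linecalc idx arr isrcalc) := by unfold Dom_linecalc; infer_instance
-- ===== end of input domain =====

-- B replaces A's dict-increment counting by sort-then-group-runs: sort the nonzero line
-- entries, run-length-encode consecutive equal values in one pass, sort the (count,value)
-- runs and flatten (objective: alternative; same return values on Pre_).

-- ===== PORT A =====
def linecalc (idx : Int) (arr : List (List Int)) (isrcalc : Bool) : List Int :=
  let lim : Nat := if isrcalc then (PySem.List.pyGetD arr 0 []).length else arr.length
  let items : PySem.Dict Int Int :=
    (PySem.List.pyRange 0 (lim : Int)).foldl (fun d i =>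
      let item := if isrcalc then PySem.List.pyGetD (PySem.List.pyGetD arr idx []) i 0
                  else PySem.List.pyGetD (PySem.List.pyGetD arr i []) idx 0
      if item == 0 then d
      else
        let d' := d.setdefault item 0
        d'.insert item (d'.getD item 0 + 1)) PySem.Dict.empty
  let itemsL := PySem.List.sorted2 items.items (fun x => x.2) (fun x => x.1)
  let newlist := itemsL.foldl (fun acc p => acc ++ [p.1, p.2]) []
  if newlist.length > 100 then PySem.List.slice newlist none (some 100) else newlist

-- ===== PORT B =====
def linecalc_alt (idx : Int) (arr : List (List Int)) (isrcalc : Bool) : List Int :=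
  let line : List Int :=
    if isrcalc then PySem.List.slice (PySem.List.pyGetD arr idx []) none (some ((PySem.List.pyGetD arr 0 []).length : Int))
    else arr.map (fun row => PySem.List.pyGetD row idx 0)
  let vals := PySem.List.sorted (line.filter (fun v => !(v == 0))) (fun x => x)
  let runs := vals.foldl (fun rs v =>
    match rs.getLast? with
    | some p => if p.2 == v then rs.dropLast ++ [(p.1 + 1, v)] else rs ++ [((1 : Int), v)]
    | none => rs ++ [((1 : Int), v)]) []
  let runs' := PySem.List.sorted2 runs (fun x => x.1) (fun x => x.2)
  let out := runs'.foldl (fun acc p => acc ++ [p.2, p.1]) []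
  PySem.List.slice out none (some 100)

-- ===== PRECONDITION & SPEC =====
-- Pre_ excludes exactly the inputs where A raises IndexError (empty arr or bad idx or a
-- too-short selected row in row mode; a bad idx for some row in column mode), plus the
-- corner where isrcalc holds, row 0 is empty and idx is out of range: there A's loop body
-- never runs so A returns [], while B's natural arr[idx] access raises IndexError.
def Pre_linecalc (idx : Int) (arr : List (List Int)) (isrcalc : Bool) : Prop :=
  if isrcalc then
    arr ≠ [] ∧ PySem.Raise.InRange arr.length idx ∧
      (PySem.List.pyGetD arr 0 []).length ≤ (PySem.List.pyGetD arr idx []).length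
  else ∀ row ∈ arr, PySem.Raise.InRange row.length idx
instance (idx : Int) (arr : List (List Int)) (isrcalc : Bool) : Decidable (Pre_linecalc idx arr isrcalc) := by
  unfold Pre_linecalc PySem.Raise.InRange; infer_instance

def pvWitness_linecalc : Int × List (List Int) × Bool := (0, [[1, 2], [1, 0]], true)

def Spec_linecalc (idx : Int) (arr : List (List Int)) (isrcalc : Bool) (out : List Int) : Prop := out = linecalc_alt idx arr isrcalc
instance (idx : Int) (arr : List (List Int)) (isrcalc : Bool) (out : List Int) : Decidable (Spec_linecalc idx arr isrcalc out) := by unfold Spec_linecalc; infer_instance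

-- ===== CLAIM (what is proved, stated in full; the proofs are below) =====
def Claim_equal_linecalc : Prop := ∀ (idx : Int) (arr : List (List Int)) (isrcalc : Bool), Dom_linecalc idx arr isrcalc → Pre_linecalc idx arr isrcalc → Spec_linecalc idx arr isrcalc (linecalc idx arr isrcalc)
-- ===== LEMMAS AND PROOFS =====

-- The strict comparison sorted2 uses (Python's key = (k1 x, k2 x), lexicographic).
def pvLexlt {α : Type} (k1 k2 : α → Int) (a b : α) : Bool :=
  decide (k1 a < k1 b) || (!decide (k1 b < k1 a) && decide (k2 a < k2 b))

theorem pvSorted2_eq_foldl {α : Type} (k1 k2 : α → Int) (xs : List α) :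
    PySem.List.sorted2 xs k1 k2 =
      xs.foldl (fun acc x => PySem.List.insertBy (pvLexlt k1 k2) x acc) [] := rfl

theorem pvLexlt_asymm {α : Type} (k1 k2 : α → Int) {a b : α}
    (h : pvLexlt k1 k2 a b = true) : pvLexlt k1 k2 b a = false := by
  simp only [pvLexlt] at h ⊢
  simp at h ⊢
  omega

theorem pvLexlt_false_of_false_of_true {α : Type} (k1 k2 : α → Int) {w x y : α}
    (hwy : pvLexlt k1 k2 w y = false) (hxy : pvLexlt k1 k2 x y = true) :
    pvLexlt k1 k2 w x = false := by
  simp only [pvLexlt] at hwy hxy ⊢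
  simp at hwy hxy ⊢
  omega

theorem pvInsertBy_pairwise {α : Type} (k1 k2 : α → Int) (x : α) (l : List α)
    (h : l.Pairwise (fun a b => pvLexlt k1 k2 b a = false)) :
    (PySem.List.insertBy (pvLexlt k1 k2) x l).Pairwise (fun a b => pvLexlt k1 k2 b a = false) := by
  induction l with
  | nil => simp [PySem.List.insertBy]
  | cons y ys ih =>
    rw [List.pairwise_cons] at h
    obtain ⟨hy, hys⟩ := h
    by_cases hxy : pvLexlt k1 k2 x y = true
    · rw [show PySem.List.insertBy (pvLexlt k1 k2) x (y :: ys) = x :: y :: ys from by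
        simp [PySem.List.insertBy, hxy]]
      rw [List.pairwise_cons]
      refine ⟨?_, List.pairwise_cons.mpr ⟨hy, hys⟩⟩
      intro w hw
      rcases List.mem_cons.mp hw with rfl | hw
      · exact pvLexlt_asymm k1 k2 hxy
      · exact pvLexlt_false_of_false_of_true k1 k2 (hy w hw) hxy
    · rw [show PySem.List.insertBy (pvLexlt k1 k2) x (y :: ys)
          = y :: PySem.List.insertBy (pvLexlt k1 k2) x ys from by
        simp [PySem.List.insertBy, hxy]]
      rw [List.pairwise_cons]
      refine ⟨?_, ih hys⟩
      intro w hw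
      rcases (PySem.List.mem_insertBy _ _ _ _).mp hw with rfl | hw
      · simpa using hxy
      · exact hy w hw

theorem pvSorted2_pairwise {α : Type} (k1 k2 : α → Int) (xs : List α) :
    (PySem.List.sorted2 xs k1 k2).Pairwise (fun a b => pvLexlt k1 k2 b a = false) := by
  rw [pvSorted2_eq_foldl]
  suffices h : ∀ (acc : List α), acc.Pairwise (fun a b => pvLexlt k1 k2 b a = false) →
      (xs.foldl (fun acc x => PySem.List.insertBy (pvLexlt k1 k2) x acc) acc).Pairwise
        (fun a b => pvLexlt k1 k2 b a = false) from h [] (by simp)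
  induction xs with
  | nil => intro acc h; simpa using h
  | cons x xs ih => intro acc h; exact ih _ (pvInsertBy_pairwise k1 k2 x acc h)

theorem pvSorted2_eq_of_pairwise {α : Type} (k1 k2 : α → Int)
    (hinj : ∀ a b : α, k1 a = k1 b → k2 a = k2 b → a = b) (xs ys : List α)
    (hperm : ys.Perm xs) (hpair : ys.Pairwise (fun a b => pvLexlt k1 k2 a b = true)) :
    PySem.List.sorted2 xs k1 k2 = ys := by
  refine List.Perm.eq_of_pairwise (le := fun a b => pvLexlt k1 k2 b a = false)
    ?_ (pvSorted2_pairwise k1 k2 xs) ?_ ((PySem.List.sorted2_perm xs k1 k2 false).trans hperm.symm)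
  · intro a b _ _ hab hba
    simp only [pvLexlt] at hab hba
    simp at hab hba
    exact hinj a b (by omega) (by omega)
  · refine hpair.imp ?_
    intro a b h
    simp only [pvLexlt] at h ⊢
    simp at h ⊢
    omega

theorem pvSorted2_pairwise_lt {α : Type} (k1 k2 : α → Int)
    (hinj : ∀ a b : α, k1 a = k1 b → k2 a = k2 b → a = b) (xs : List α) (hnd : xs.Nodup) :
    (PySem.List.sorted2 xs k1 k2).Pairwise (fun a b => pvLexlt k1 k2 a b = true) := by
  have hnd' : (PySem.List.sorted2 xs k1 k2).Nodup :=
    (PySem.List.sorted2_perm xs k1 k2 false).symm.nodup hnd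
  refine ((pvSorted2_pairwise k1 k2 xs).and hnd').imp ?_
  rintro a b ⟨h, hne⟩
  simp only [pvLexlt] at h ⊢
  simp at h ⊢
  rcases lt_trichotomy (k1 a) (k1 b) with h1 | h1 | h1
  · omega
  · rcases lt_trichotomy (k2 a) (k2 b) with h2 | h2 | h2
    · omega
    · exact absurd (hinj a b h1 h2) hne
    · omega
  · omega

-- the setdefault-then-increment step IS the counter step
theorem pvSetdefault_step (d : PySem.Dict Int Int) (x : Int) :
    (d.setdefault x 0).insert x ((d.setdefault x 0).getD x 0 + 1) = d.insert x (d.getD x 0 + 1) := by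
  rw [PySem.Dict.getD_setdefault_self]
  by_cases h : d.contains x = true
  · rw [PySem.Dict.setdefault_of_contains d 0 h]
  · rw [PySem.Dict.setdefault_of_not_contains d 0 (by simpa using h),
      PySem.Dict.insert_insert_self]

-- A's skip-zeros dict loop over a line is Counter of the nonzero entries
theorem pvLoop_eq_counter (line : List Int) :
    line.foldl (fun d item =>
        if item == 0 then d
        else
          let d' := d.setdefault item 0
          d'.insert item (d'.getD item 0 + 1)) PySem.Dict.empty
      = PySem.Dict.counter (line.filter (fun v => !(v == 0))) := by
  rw [PySem.List.foldl_congr_mem line _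
      (fun d item => if !(item == 0) then d.insert item (d.getD item 0 + 1) else d) _ ?_]
  · rw [PySem.List.foldl_if_eq_foldl_filter,
      PySem.Dict.foldl_insert_getD_add_one_eq_counter]
  · intro d item _
    by_cases h : item = 0
    · simp [h]
    · simp [h, pvSetdefault_step]

-- reading positions 0..lim-1 of a list is take lim
theorem pvTake_map (row : List Int) (lim : Nat) (h : lim ≤ row.length) :
    (PySem.List.pyRange 0 (lim : Int)).map (fun i => PySem.List.pyGetD row i 0) = row.take lim := by
  have := PySem.List.map_pyGetD_pyRange_zero (row.take lim) 0
  rw [PySem.List.len] at this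
  rw [List.length_take, Nat.min_eq_left h] at this
  rw [← this]
  refine List.map_congr_left ?_
  intro i hi
  rw [PySem.List.mem_pyRange_one] at hi
  rw [PySem.List.pyGetD_of_nonneg _ _ hi.1, PySem.List.pyGetD_of_nonneg _ _ hi.1]
  have hlt : i.toNat < lim := by omega
  rw [List.getD_eq_getElem?_getD, List.getD_eq_getElem?_getD, List.getElem?_take_of_lt hlt]

-- proof-only shape helpers: the two pipelines as functions of the extracted line
def pvStepA (d : PySem.Dict Int Int) (item : Int) : PySem.Dict Int Int :=
  if item == 0 then d
  else
    let d' := d.setdefault item 0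
    d'.insert item (d'.getD item 0 + 1)

def pvTailA (d : PySem.Dict Int Int) : List Int :=
  let itemsL := PySem.List.sorted2 d.items (fun x => x.2) (fun x => x.1)
  let newlist := itemsL.foldl (fun acc p => acc ++ [p.1, p.2]) []
  if newlist.length > 100 then PySem.List.slice newlist none (some 100) else newlist

-- B's run-length-encoding step (the loop body of Source B's grouping pass)
def pvGS (rs : List (Int × Int)) (v : Int) : List (Int × Int) :=
  match rs.getLast? with
  | some p => if p.2 == v then rs.dropLast ++ [(p.1 + 1, v)] else rs ++ [((1 : Int), v)]
  | none => rs ++ [((1 : Int), v)]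

def pvB (line : List Int) : List Int :=
  let vals := PySem.List.sorted (line.filter (fun v => !(v == 0))) (fun x => x)
  let runs := vals.foldl pvGS []
  let runs' := PySem.List.sorted2 runs (fun x => x.1) (fun x => x.2)
  let out := runs'.foldl (fun acc p => acc ++ [p.2, p.1]) []
  PySem.List.slice out none (some 100)

-- recursive run-length-encoding spec (head value with its total count, then the rest)
def pvRle : List Int → List (Int × Int)
  | [] => []
  | v :: t => (((t.count v : Int) + 1), v) :: pvRle (t.filter (fun x => x ≠ v))
termination_by l => l.length
decreasing_by
  simp only [List.length_cons, List.length_unattach]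
  exact Nat.lt_succ_of_le (le_trans (List.length_filter_le _ _) (by simp))

-- a sorted list splits as its minimum's block followed by the rest
theorem pvSplit_min (l : List Int) (hp : l.Pairwise (· ≤ ·)) (v : Int)
    (hmin : ∀ x ∈ l, v ≤ x) :
    l = List.replicate (l.count v) v ++ l.filter (fun x => x ≠ v) := by
  induction l with
  | nil => simp
  | cons x t ih =>
    rw [List.pairwise_cons] at hp
    by_cases hx : x = v
    · subst hx
      have hrec := ih hp.2 (fun y hy => hmin y (List.mem_cons_of_mem _ hy))
      calc x :: t = x :: (List.replicate (t.count x) x ++ t.filter (fun y => y ≠ x)) := by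
            rw [← hrec]
        _ = List.replicate ((x :: t).count x) x ++ (x :: t).filter (fun y => y ≠ x) := by
            rw [List.count_cons_self, List.replicate_succ]
            simp
    · have hvx : v < x := lt_of_le_of_ne (hmin x (List.mem_cons_self)) (Ne.symm hx)
      have hnv : ∀ y ∈ x :: t, y ≠ v := by
        intro y hy
        rcases List.mem_cons.mp hy with rfl | hy
        · exact hx
        · exact ne_of_gt (lt_of_lt_of_le hvx (hp.1 y hy))
      have hc : (x :: t).count v = 0 := by
        rw [List.count_eq_zero]
        intro hv; exact hnv v hv rfl
      have hf : (x :: t).filter (fun y => y ≠ v) = x :: t := by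
        rw [List.filter_eq_self]
        intro y hy; simpa using hnv y hy
      rw [hc, hf]; simp

-- appending c more copies of v extends the last run by c
theorem pvGS_replicate (rs : List (Int × Int)) (k : Int) (c : Nat) (v : Int) :
    (List.replicate c v).foldl pvGS (rs ++ [(k, v)]) = rs ++ [(k + c, v)] := by
  induction c generalizing k with
  | zero => simp
  | succ c ih =>
    rw [List.replicate_succ, List.foldl_cons]
    have hstep : pvGS (rs ++ [(k, v)]) v = rs ++ [(k + 1, v)] := by
      simp [pvGS]
    rw [hstep, ih (k + 1)]
    have : k + 1 + (c : Int) = k + ((c : Nat) + 1 : Nat) := by push_cast; ring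
    rw [this]

-- a fresh block of c+1 copies of v appends one run (1+c, v)
theorem pvGS_block (rs : List (Int × Int)) (c : Nat) (v : Int)
    (hlast : ∀ p, rs.getLast? = some p → p.2 ≠ v) :
    (List.replicate (c + 1) v).foldl pvGS rs = rs ++ [((1 : Int) + c, v)] := by
  rw [List.replicate_succ, List.foldl_cons]
  have hstep : pvGS rs v = rs ++ [((1 : Int), v)] := by
    unfold pvGS
    cases h : rs.getLast? with
    | none => rfl
    | some p => simp [hlast p h]
  rw [hstep, pvGS_replicate]

-- the grouping loop over a sorted list computes pvRle
theorem pvFoldGS_eq_rle (n : Nat) : ∀ (l : List Int), l.length ≤ n →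
    l.Pairwise (· ≤ ·) → ∀ (rs : List (Int × Int)),
    (∀ p hd, rs.getLast? = some p → l.head? = some hd → p.2 ≠ hd) →
    l.foldl pvGS rs = rs ++ pvRle l := by
  induction n with
  | zero =>
    intro l hl _ rs _
    cases l with
    | nil => simp [pvRle]
    | cons v t => exact absurd hl (by simp)
  | succ n ih =>
    intro l hl hp rs hlast
    cases l with
    | nil => simp [pvRle]
    | cons v t =>
      have hmin : ∀ x ∈ v :: t, v ≤ x := by
        intro x hx
        rcases List.mem_cons.mp hx with rfl | hx
        · exact le_refl x
        · exact (List.pairwise_cons.mp hp).1 x hx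
      have hsplit := pvSplit_min (v :: t) hp v hmin
      have hcnt : (v :: t).count v = t.count v + 1 := by simp
      have hfilt : (v :: t).filter (fun x => x ≠ v) = t.filter (fun x => x ≠ v) := by
        simp
      rw [hcnt, hfilt] at hsplit
      set rest := t.filter (fun x => x ≠ v) with hrest
      have hrestp : rest.Pairwise (· ≤ ·) := ((List.pairwise_cons.mp hp).2).filter _
      have hrestlen : rest.length ≤ n := by
        have h1 : rest.length ≤ t.length := List.length_filter_le _ _
        have h2 : t.length + 1 ≤ n + 1 := by simpa using hl
        omega
      have hlast0 : ∀ p, rs.getLast? = some p → p.2 ≠ v := fun p hps => hlast p v hps rfl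
      calc (v :: t).foldl pvGS rs
          = (List.replicate (t.count v + 1) v ++ rest).foldl pvGS rs := by rw [← hsplit]
        _ = rest.foldl pvGS ((List.replicate (t.count v + 1) v).foldl pvGS rs) := by
            rw [List.foldl_append]
        _ = rest.foldl pvGS (rs ++ [((1 : Int) + t.count v, v)]) := by
            rw [pvGS_block rs (t.count v) v hlast0]
        _ = (rs ++ [((1 : Int) + t.count v, v)]) ++ pvRle rest := by
            refine ih rest hrestlen hrestp _ ?_
            intro p hd hps hhd
            rw [List.getLast?_concat] at hps
            cases hps
            have hmem : hd ∈ rest := List.mem_of_mem_head? hhd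
            have hne := List.of_mem_filter hmem
            simp only [decide_eq_true_eq] at hne
            simpa using fun h => hne h.symm
        _ = rs ++ pvRle (v :: t) := by
            rw [pvRle]
            simp only [← hrest, List.append_assoc, List.cons_append, List.nil_append]
            have : (1 : Int) + (t.count v : Int) = (t.count v : Int) + 1 := by ring
            rw [this]

-- pvRle's runs: each pair is (count, value), values are distinct and cover the list
theorem pvRle_props (n : Nat) : ∀ (l : List Int), l.length ≤ n →
    (∀ p ∈ pvRle l, p.1 = (l.count p.2 : Int) ∧ p.2 ∈ l) ∧
      ((pvRle l).map Prod.snd).Nodup ∧ (∀ v ∈ l, v ∈ (pvRle l).map Prod.snd) := by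
  induction n with
  | zero =>
    intro l hl
    cases l with
    | nil => simp [pvRle]
    | cons v t => exact absurd hl (by simp)
  | succ n ih =>
    intro l hl
    cases l with
    | nil => simp [pvRle]
    | cons v t =>
      set rest := t.filter (fun x => x ≠ v) with hrest
      have hrestlen : rest.length ≤ n := by
        have h1 : rest.length ≤ t.length := List.length_filter_le _ _
        have h2 : t.length + 1 ≤ n + 1 := by simpa using hl
        omega
      obtain ⟨ihp, ihnd, ihcov⟩ := ih rest hrestlen
      have hmem_ne : ∀ x ∈ rest, x ≠ v := by
        intro x hx
        have := List.of_mem_filter hx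
        simpa using this
      have hcount : ∀ w, w ≠ v → rest.count w = t.count w := by
        intro w hw
        rw [hrest, List.count_filter]
        simp [hw]
      rw [pvRle]
      refine ⟨?_, ?_, ?_⟩
      · intro p hp
        rcases List.mem_cons.mp hp with rfl | hp
        · simp
        · obtain ⟨h1, h2⟩ := ihp p hp
          have hne : p.2 ≠ v := hmem_ne p.2 h2
          have h2' : p.2 ∈ t := List.mem_of_mem_filter h2
          refine ⟨?_, List.mem_cons_of_mem _ h2'⟩
          rw [h1, hcount p.2 hne]
          simp only [List.count_cons]
          have hbe : (v == p.2) = false := by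
            simpa using fun h : v = p.2 => hne h.symm
          simp [hbe]
      · rw [List.map_cons]
        rw [List.nodup_cons]
        refine ⟨?_, ihnd⟩
        intro hv
        rw [List.mem_map] at hv
        obtain ⟨p, hp, hpv⟩ := hv
        exact hmem_ne p.2 (ihp p hp).2 hpv
      · intro w hw
        rcases List.mem_cons.mp hw with rfl | hw
        · simp
        · by_cases hwv : w = v
          · subst hwv; simp
          · have : w ∈ rest := by
              rw [hrest, List.mem_filter]
              exact ⟨hw, by simpa using hwv⟩
            exact List.mem_cons_of_mem _ (ihcov w this)

-- core: for any extracted line, A's dict-sort-flatten equals B's sort-group-sort-flatten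
theorem pvCore (line : List Int) : pvTailA (line.foldl pvStepA PySem.Dict.empty) = pvB line := by
  unfold pvTailA pvB pvStepA
  simp only [pvLoop_eq_counter]
  set vals := line.filter (fun v => !(v == 0)) with hvals
  set svals := PySem.List.sorted vals (fun x => x) with hsvals
  have hsperm : svals.Perm vals := PySem.List.sorted_perm vals (fun x => x) false
  have hsp : svals.Pairwise (· ≤ ·) := PySem.List.sorted_pairwise vals (fun x => x)
  -- the grouping loop computes pvRle svals
  have hruns : svals.foldl pvGS [] = pvRle svals := by
    have := pvFoldGS_eq_rle svals.length svals (le_refl _) hsp []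
      (by intro p hd hps _; simp at hps)
    simpa using this
  obtain ⟨hprops, hnd, hcov⟩ := pvRle_props svals.length svals (le_refl _)
  set u := (pvRle svals).map Prod.snd with hu
  -- pvRle svals = u.map (fun v => (count, v))
  have hrle_map : pvRle svals = u.map (fun v => ((vals.count v : Int), v)) := by
    rw [hu, List.map_map]
    refine ((List.map_congr_left ?_).trans (List.map_id _)).symm
    intro p hp
    obtain ⟨h1, _⟩ := hprops p hp
    have hc : svals.count p.2 = vals.count p.2 := hsperm.count_eq p.2
    simp only [Function.comp_apply, id_eq]
    refine Prod.ext ?_ rfl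
    rw [← hc]
    exact h1.symm
  have hrle_nd : (pvRle svals).Nodup := by
    have hmapinj : Function.Injective (fun v : Int => ((vals.count v : Int), v)) := by
      intro a b h; simpa using congrArg Prod.snd h
    rw [hrle_map]; exact hnd.map hmapinj
  -- u is a permutation of Set.ofList vals
  have huperm : u.Perm (PySem.Set.ofList vals) := by
    rw [List.perm_ext_iff_of_nodup hnd (PySem.Set.nodup_ofList vals)]
    intro x
    rw [PySem.Set.mem_ofList]
    constructor
    · intro hx
      rw [hu, List.mem_map] at hx
      obtain ⟨p, hp, hpx⟩ := hx
      have := (hprops p hp).2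
      rw [hpx] at this
      exact (hsperm.mem_iff).mp this
    · intro hx
      exact hcov x ((hsperm.mem_iff).mpr hx)
  set g : Int → Int × Int := fun v => ((vals.count v : Int), v) with hg
  set zs := PySem.List.sorted2 (svals.foldl pvGS []) (fun x => x.1) (fun x => x.2) with hzs
  have hinjA : ∀ a b : Int × Int, a.2 = b.2 → a.1 = b.1 → a = b := by
    intro a b h2 h1; exact Prod.ext h1 h2
  have hinjB : ∀ a b : Int × Int, a.1 = b.1 → a.2 = b.2 → a = b := by
    intro a b h1 h2; exact Prod.ext h1 h2
  -- the sorted item lists correspond under Prod.swap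
  have hkey : PySem.List.sorted2 (PySem.Dict.counter vals).items (fun x => x.2) (fun x => x.1)
      = zs.map Prod.swap := by
    refine pvSorted2_eq_of_pairwise _ _ hinjA _ _ ?_ ?_
    · have h1 : zs.Perm (pvRle svals) := by
        rw [hzs, hruns]; exact PySem.List.sorted2_perm _ _ _ false
      have h2 : (zs.map Prod.swap).Perm ((pvRle svals).map Prod.swap) := h1.map Prod.swap
      rw [hrle_map, List.map_map] at h2
      have h4 := huperm.map (fun v : Int => (v, (vals.count v : Int)))
      rw [PySem.Dict.items_counter]
      exact h2.trans h4
    · have hstrict := pvSorted2_pairwise_lt (fun x : Int × Int => x.1) (fun x => x.2) hinjB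
        (svals.foldl pvGS []) (by rw [hruns]; exact hrle_nd)
      rw [← hzs] at hstrict
      rw [List.pairwise_map]
      refine hstrict.imp ?_
      intro a b h
      simpa [pvLexlt] using h
  rw [hkey]
  rw [PySem.List.foldl_append_eq_flatMap, PySem.List.foldl_append_eq_flatMap,
    List.nil_append, List.nil_append, List.flatMap_map]
  simp only [Prod.fst_swap, Prod.snd_swap]
  set out := zs.flatMap (fun p : Int × Int => [p.2, p.1]) with hout
  rw [PySem.List.slice_to out (by norm_num)]
  by_cases h : out.length > 100
  · simp [h]
  · rw [if_neg h, List.take_of_length_le (by omega)]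

-- ===== VERDICT (by name: the statement is the Claim_ definition above) =====
theorem linecalc_spec : Claim_equal_linecalc := by
  intro idx arr isrcalc _ hpre
  unfold Spec_linecalc
  cases isrcalc with
  | false =>
    have hA : linecalc idx arr false
        = pvTailA ((PySem.List.pyRange 0 (arr.length : Int)).foldl
            (fun d i => pvStepA d (PySem.List.pyGetD (PySem.List.pyGetD arr i []) idx 0))
            PySem.Dict.empty) := rfl
    have hB : linecalc_alt idx arr false = pvB (arr.map (fun row => PySem.List.pyGetD row idx 0)) := rfl
    rw [hA, hB, ← pvCore]
    congr 1
    have hmap : (PySem.List.pyRange 0 (arr.length : Int)).map (fun i => PySem.List.pyGetD arr i []) = arr := by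
      have := PySem.List.map_pyGetD_pyRange_zero arr []
      rwa [PySem.List.len] at this
    calc (PySem.List.pyRange 0 (arr.length : Int)).foldl
            (fun d i => pvStepA d (PySem.List.pyGetD (PySem.List.pyGetD arr i []) idx 0))
            PySem.Dict.empty
        = ((PySem.List.pyRange 0 (arr.length : Int)).map (fun i => PySem.List.pyGetD arr i [])).foldl
            (fun d row => pvStepA d (PySem.List.pyGetD row idx 0)) PySem.Dict.empty := by
          rw [List.foldl_map]
      _ = (arr.map (fun row => PySem.List.pyGetD row idx 0)).foldl pvStepA PySem.Dict.empty := by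
          rw [hmap, List.foldl_map]
  | true =>
    unfold Pre_linecalc at hpre
    simp only [if_pos] at hpre
    rcases hpre with ⟨-, -, hlen⟩
    have hA : linecalc idx arr true
        = pvTailA ((PySem.List.pyRange 0 ((PySem.List.pyGetD arr 0 []).length : Int)).foldl
            (fun d i => pvStepA d (PySem.List.pyGetD (PySem.List.pyGetD arr idx []) i 0))
            PySem.Dict.empty) := rfl
    have hB : linecalc_alt idx arr true
        = pvB (PySem.List.slice (PySem.List.pyGetD arr idx []) none
            (some ((PySem.List.pyGetD arr 0 []).length : Int))) := rfl
    have hsl : PySem.List.slice (PySem.List.pyGetD arr idx []) none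
        (some ((PySem.List.pyGetD arr 0 []).length : Int))
        = (PySem.List.pyGetD arr idx []).take (PySem.List.pyGetD arr 0 []).length := by
      rw [PySem.List.slice_to _ (by positivity)]
      norm_num
    rw [hA, hB, hsl, ← pvCore]
    congr 1
    calc (PySem.List.pyRange 0 ((PySem.List.pyGetD arr 0 []).length : Int)).foldl
            (fun d i => pvStepA d (PySem.List.pyGetD (PySem.List.pyGetD arr idx []) i 0))
            PySem.Dict.empty
        = ((PySem.List.pyRange 0 ((PySem.List.pyGetD arr 0 []).length : Int)).map
            (fun i => PySem.List.pyGetD (PySem.List.pyGetD arr idx []) i 0)).foldl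
            pvStepA PySem.Dict.empty := by rw [List.foldl_map]
      _ = ((PySem.List.pyGetD arr idx []).take (PySem.List.pyGetD arr 0 []).length).foldl
            pvStepA PySem.Dict.empty := by rw [pvTake_map _ _ hlen]
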